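-- pv_equiv track=rewrite | github.com/apf-docchat/api | source/api/utilities/externalapi_helpers/popupbot_helper.py | get_webpage_name
-- ===== SOURCE A (Python) =====
-- def get_webpage_name(page_url):
--     # Extract a meaningful name from the URL
--     url_parts = page_url.rstrip('/').split('/')
--     if url_parts[-1]:  # If there's text after the last slash
--         webpage_name = url_parts[-1]
--     else:
--         # If URL ends with slash, take the second-to-last segment
--         for i in range(len(url_parts)-1, -1, -1):
--             if url_parts[i]:  # Find the first non-empty segment going backwards
--                 webpage_name = url_parts[i]
--                 break
--         else:
--             # Fallback if no meaningful segments are found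
--             webpage_name = "index"
--     return webpage_name
-- ===== SOURCE B (Python) =====
-- def get_webpage_name(page_url):
--     # Single right-to-left scan: skip trailing slashes, collect the last
--     # non-empty path segment, stop at the slash before it.
--     chars = []
--     for ch in reversed(page_url):
--         if ch == '/':
--             if chars:
--                 break
--         else:
--             chars.append(ch)
--     return ''.join(reversed(chars)) if chars else "index"
-- ===== Notes on version B (the rewrite author's own statement) =====
-- stated objective: simpler
-- what changed: B replaces A's strip-trailing-slashes preprocessing, split-into-parts list and backward index loop over the parts with a single right-to-left character scan that stops as soon as the last non-empty segment has been read.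
import Mathlib
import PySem

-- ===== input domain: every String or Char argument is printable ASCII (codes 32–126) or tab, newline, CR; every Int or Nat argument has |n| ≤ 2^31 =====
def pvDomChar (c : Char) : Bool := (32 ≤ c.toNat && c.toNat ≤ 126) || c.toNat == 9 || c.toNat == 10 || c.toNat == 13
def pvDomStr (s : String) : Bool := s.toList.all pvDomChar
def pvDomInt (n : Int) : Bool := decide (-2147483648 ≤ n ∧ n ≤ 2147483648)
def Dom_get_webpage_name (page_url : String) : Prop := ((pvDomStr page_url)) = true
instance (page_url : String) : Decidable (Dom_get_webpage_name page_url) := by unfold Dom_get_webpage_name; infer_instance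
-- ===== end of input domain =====

-- B replaces A's rstrip('/') + split('/') + backward index loop over the parts list with
-- one right-to-left character scan that stops once the last non-empty segment is read (simpler).

-- ===== PORT A =====
-- hand port of page_url.rstrip('/') (PySem has no rstrip-with-chars form); exact:
-- Python rstrip('/') removes exactly the maximal run of trailing '/' characters.
def pyRstripSlash (s : List Char) : List Char :=
  (s.reverse.dropWhile (fun c => c = '/')).reverse

-- the 'for i in range(len(url_parts)-1, -1, -1)' loop with its break / for-else fallback
def aLoop (url_parts : List (List Char)) : List Int → String
  | [] => "index"
  | i :: rest =>
      if PySem.List.pyGetD url_parts i [] ≠ [] then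
        String.ofList (PySem.List.pyGetD url_parts i [])
      else aLoop url_parts rest

def a_fromStripped (t : List Char) : String :=
  let url_parts := PySem.Chars.splitOn t ['/']
  -- url_parts[-1]: split always returns at least one part, so the index is in range
  if PySem.List.pyGetD url_parts (-1) [] ≠ [] then
    String.ofList (PySem.List.pyGetD url_parts (-1) [])
  else
    aLoop url_parts (PySem.List.pyRange ((url_parts.length : Int) - 1) (-1) (-1))

def get_webpage_name (page_url : String) : String :=
  a_fromStripped (pyRstripSlash page_url.toList)

-- ===== PORT B =====
-- 'for ch in reversed(page_url): …' with break; chars is the Python accumulator list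
def altLoop : List Char → List Char → List Char
  | [], chars => chars
  | c :: rest, chars =>
      if c = '/' then (if chars = [] then altLoop rest chars else chars)
      else altLoop rest (chars ++ [c])

def get_webpage_name_alt (page_url : String) : String :=
  let chars := altLoop page_url.toList.reverse []
  if chars = [] then "index" else String.ofList chars.reverse

-- ===== PRECONDITION & SPEC =====
def Spec_get_webpage_name (page_url : String) (out : String) : Prop := out = get_webpage_name_alt page_url
instance (page_url : String) (out : String) : Decidable (Spec_get_webpage_name page_url out) := by unfold Spec_get_webpage_name; infer_instance

-- ===== CLAIM (what is proved, stated in full; the proofs are below) =====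
def Claim_equal_get_webpage_name : Prop := ∀ (page_url : String), Dom_get_webpage_name page_url → Spec_get_webpage_name page_url (get_webpage_name page_url)

-- ===== LEMMAS AND PROOFS =====

-- simple structural model of splitting on '/'
def split1aux : List Char → List Char → List (List Char)
  | [], cur => [cur.reverse]
  | c :: rest, cur =>
      if c = '/' then cur.reverse :: split1aux rest [] else split1aux rest (c :: cur)

theorem splitOn_go_eq (f : Nat) : ∀ (l cur : List Char) (acc : List (List Char)) (_ : l.length ≤ f),
    PySem.Chars.splitOn.go ['/'] f l cur acc = acc.reverse ++ split1aux l cur := by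
  induction f with
  | zero =>
      intro l cur acc h
      have hl : l = [] := List.length_eq_zero_iff.mp (Nat.le_zero.mp h)
      subst hl
      simp [PySem.Chars.splitOn.go, split1aux]
  | succ f ih =>
      intro l cur acc h
      cases l with
      | nil => simp [PySem.Chars.splitOn.go, split1aux]
      | cons c rest =>
          by_cases hc : c = '/'
          · subst hc
            have : PySem.Chars.splitOn.go ['/'] (f+1) ('/' :: rest) cur acc
                = PySem.Chars.splitOn.go ['/'] f rest [] (cur.reverse :: acc) := by
              simp [PySem.Chars.splitOn.go, List.isPrefixOf]
            rw [this, ih rest [] (cur.reverse :: acc) (by simpa using Nat.lt_succ_iff.mp (by simpa using h))]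
            simp [split1aux]
          · have : PySem.Chars.splitOn.go ['/'] (f+1) (c :: rest) cur acc
                = PySem.Chars.splitOn.go ['/'] f rest (c :: cur) acc := by
              simp [PySem.Chars.splitOn.go, List.isPrefixOf]
              intro h; exact absurd h.symm hc
            rw [this, ih rest (c :: cur) acc (by simpa using Nat.lt_succ_iff.mp (by simpa using h))]
            simp [split1aux, hc]

theorem splitOn_eq (l : List Char) : PySem.Chars.splitOn l ['/'] = split1aux l [] := by
  have := splitOn_go_eq (l.length + 1) l [] [] (by omega)
  simpa [PySem.Chars.splitOn] using this

theorem split1aux_ne_nil (l cur : List Char) : split1aux l cur ≠ [] := by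
  induction l generalizing cur with
  | nil => simp [split1aux]
  | cons c rest ih =>
      by_cases hc : c = '/' <;> simp [split1aux, hc] <;> exact ih _

-- the last non-empty-suffix-after-the-last-slash, scanning forward (matches A's backward pick)
def lsuf : List Char → List Char
  | [] => []
  | c :: rest =>
      if c = '/' then lsuf rest
      else if '/' ∈ rest then lsuf rest else c :: rest

theorem lsuf_of_not_mem (l : List Char) (h : '/' ∉ l) : lsuf l = l := by
  induction l with
  | nil => rfl
  | cons c rest ih =>
      simp only [List.mem_cons, not_or] at h
      simp [lsuf, Ne.symm h.1, h.2]

theorem getLast?_cons_ne {α : Type} (x : α) (xs : List α) (h : xs ≠ []) :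
    (x :: xs).getLast? = xs.getLast? := by
  cases xs with
  | nil => exact absurd rfl h
  | cons y ys => simp [List.getLast?_cons]

theorem getLast?_split1aux (l : List Char) : ∀ cur,
    (split1aux l cur).getLast? = some (if '/' ∈ l then lsuf l else cur.reverse ++ l) := by
  induction l with
  | nil => intro cur; simp [split1aux]
  | cons c rest ih =>
      intro cur
      by_cases hc : c = '/'
      · subst hc
        have h1 : split1aux ('/' :: rest) cur = cur.reverse :: split1aux rest [] := by
          simp [split1aux]
        rw [h1, getLast?_cons_ne _ _ (split1aux_ne_nil rest []), ih []]
        by_cases hm : '/' ∈ rest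
        · simp [lsuf, hm]
        · simp [lsuf, hm, lsuf_of_not_mem rest hm]
      · rw [split1aux]
        simp only [if_neg hc]
        rw [ih (c :: cur)]
        by_cases hm : '/' ∈ rest
        · simp [lsuf, hc, hm, List.mem_cons, Ne.symm hc]
        · simp [lsuf, hc, hm, List.mem_cons, Ne.symm hc]

theorem lsuf_eq_takeWhile (l : List Char) :
    lsuf l = ((l.reverse.takeWhile (fun c => c ≠ '/'))).reverse := by
  induction l with
  | nil => rfl
  | cons c rest ih =>
      rw [List.reverse_cons, List.takeWhile_append]
      split_ifs with hlen
      · have heq : List.takeWhile (fun c => c ≠ '/') rest.reverse = rest.reverse :=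
          (List.takeWhile_prefix _).eq_of_length hlen
        have hmem : '/' ∉ rest := by
          intro hm
          have := List.takeWhile_eq_self_iff.mp heq '/' (by simpa using hm)
          simp at this
        by_cases hc : c = '/'
        · subst hc
          rw [lsuf, if_pos rfl, lsuf_of_not_mem rest hmem]
          simp
        · rw [lsuf, if_neg hc, if_neg hmem]
          simp [hc]
      · have hne : List.takeWhile (fun c => c ≠ '/') rest.reverse ≠ rest.reverse :=
          fun he => hlen (by rw [he])
        have hmem : '/' ∈ rest := by
          by_contra hm
          refine hne (List.takeWhile_eq_self_iff.mpr fun a ha => ?_)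
          simp only [List.mem_reverse] at ha
          simp only [decide_eq_true_eq]
          intro h'; exact hm (h' ▸ ha)
        by_cases hc : c = '/'
        · subst hc
          rw [lsuf, if_pos rfl, ih]
        · rw [lsuf, if_neg hc, if_pos hmem, ih]

theorem altLoop_ne_nil_acc (r : List Char) : ∀ chars, chars ≠ [] →
    altLoop r chars = chars ++ r.takeWhile (fun c => c ≠ '/') := by
  induction r with
  | nil => intro chars _; simp [altLoop]
  | cons c rest ih =>
      intro chars h
      by_cases hc : c = '/'
      · subst hc; simp [altLoop, h]
      · rw [altLoop]
        simp only [if_neg hc]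
        rw [ih (chars ++ [c]) (by simp)]
        simp [hc]

theorem altLoop_nil_acc (r : List Char) :
    altLoop r [] = (r.dropWhile (fun c => c = '/')).takeWhile (fun c => c ≠ '/') := by
  induction r with
  | nil => rfl
  | cons c rest ih =>
      by_cases hc : c = '/'
      · subst hc; simp [altLoop, ih]
      · rw [altLoop]
        simp only [if_neg hc, reduceIte]
        simp only [List.nil_append]
        rw [altLoop_ne_nil_acc rest [c] (by simp)]
        simp [hc]

theorem head_dropWhile {q : Char → Bool} : ∀ (r : List Char) (c : Char) (d' : List Char),
    r.dropWhile q = c :: d' → q c = false := by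
  intro r
  induction r with
  | nil => intro c d' h; simp at h
  | cons x rest ih =>
      intro c d' h
      rw [List.dropWhile_cons] at h
      by_cases hx : q x
      · simp [hx] at h; exact ih c d' h
      · simp [hx] at h; rw [← h.1]; simpa using hx

theorem a_fromStripped_nil : a_fromStripped [] = "index" := by decide

theorem a_fromStripped_cons (c : Char) (d' : List Char) (hc : ¬ c = '/') :
    a_fromStripped (c :: d').reverse
      = String.ofList ((c :: d').takeWhile (fun c => c ≠ '/')).reverse := by
  have hparts : PySem.Chars.splitOn (c :: d').reverse ['/'] = split1aux (c :: d').reverse [] :=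
    splitOn_eq _
  have hne : split1aux (c :: d').reverse [] ≠ [] := split1aux_ne_nil _ _
  have hlast? : (split1aux (c :: d').reverse []).getLast? = some (lsuf (c :: d').reverse) := by
    rw [getLast?_split1aux]
    by_cases hm : '/' ∈ (c :: d').reverse
    · rw [if_pos hm]
    · rw [if_neg hm, lsuf_of_not_mem _ hm]
      simp
  have hlast : (split1aux (c :: d').reverse []).getLast hne = lsuf (c :: d').reverse := by
    have := List.getLast?_eq_some_getLast (l := split1aux (c :: d').reverse []) hne
    rw [hlast?] at this
    exact (Option.some_inj.mp this).symm
  have hlsuf : lsuf (c :: d').reverse = ((c :: d').takeWhile (fun c => c ≠ '/')).reverse := by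
    rw [lsuf_eq_takeWhile, List.reverse_reverse]
  have htw : (c :: d').takeWhile (fun c => c ≠ '/') = c :: d'.takeWhile (fun c => c ≠ '/') := by
    simp [hc]
  have hval : PySem.List.pyGetD (split1aux (c :: d').reverse []) (-1) []
      = ((c :: d').takeWhile (fun c => c ≠ '/')).reverse := by
    rw [PySem.List.pyGetD_neg_one _ _ hne, hlast, hlsuf]
  have hvne : ((c :: d').takeWhile (fun c => c ≠ '/')).reverse ≠ [] := by
    rw [htw]; simp
  unfold a_fromStripped
  simp only [hparts, hval, ne_eq, hvne, not_false_iff, if_true]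

-- ===== VERDICT (by name: the statement is the Claim_ definition above) =====
theorem get_webpage_name_spec : Claim_equal_get_webpage_name := by
  intro page_url _
  unfold Spec_get_webpage_name get_webpage_name get_webpage_name_alt pyRstripSlash
  rw [altLoop_nil_acc]
  cases hd : page_url.toList.reverse.dropWhile (fun c => c = '/') with
  | nil =>
      simp [a_fromStripped_nil]
  | cons c d' =>
      have hc : ¬ c = '/' := by
        have := head_dropWhile page_url.toList.reverse c d' hd
        simpa using this
      rw [a_fromStripped_cons c d' hc]
      simp [hc]
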